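-- pv_equiv track=rewrite | github.com/jslusarczykk/pythonuczelnia | kolos3pp/p1.py | f
-- ===== SOURCE A (Python) =====
-- def f(x):
--     sum=0
--     for i in range(len(x)):
--         if x[i] == "-" :
--             sum-=1
--         else:
--             sum+=1
--     return sum
-- ===== SOURCE B (Python) =====
-- def f(x):
--     return len(x) - 2 * x.count("-")
-- ===== Notes on version B (the rewrite author's own statement) =====
-- stated objective: simpler
-- what changed: Replaces the per-index loop with a branch accumulator by the closed form len(x) - 2*x.count('-'), since each dash contributes -1 and every other character +1.
import Mathlib
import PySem

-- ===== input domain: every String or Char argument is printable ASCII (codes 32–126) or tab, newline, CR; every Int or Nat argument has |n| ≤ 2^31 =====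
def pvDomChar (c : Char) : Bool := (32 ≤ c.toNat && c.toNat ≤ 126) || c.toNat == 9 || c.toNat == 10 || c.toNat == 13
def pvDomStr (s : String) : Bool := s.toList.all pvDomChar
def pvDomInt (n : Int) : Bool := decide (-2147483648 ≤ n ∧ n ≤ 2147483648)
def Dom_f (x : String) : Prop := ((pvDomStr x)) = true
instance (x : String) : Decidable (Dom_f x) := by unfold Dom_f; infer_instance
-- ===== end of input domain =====

-- B replaces A's per-character loop by the closed form len(x) - 2*x.count("-") (simpler).

-- ===== PORT A =====
-- for i in range(len(x)): if x[i] == "-": sum -= 1 else: sum += 1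
def f (x : String) : Int :=
  (PySem.List.pyRange 0 (PySem.Str.len x) 1).foldl
    (fun sum i => if PySem.List.pyGetD x.toList i ' ' == '-' then sum - 1 else sum + 1) 0

-- ===== PORT B =====
def f_alt (x : String) : Int :=
  PySem.Str.len x - 2 * (PySem.Str.count x "-" : Int)

-- ===== PRECONDITION & SPEC =====
def Spec_f (x : String) (out : Int) : Prop := out = f_alt x
instance (x : String) (out : Int) : Decidable (Spec_f x out) := by unfold Spec_f; infer_instance

-- ===== CLAIM (what is proved, stated in full; the proofs are below) =====
def Claim_equal_f : Prop := ∀ (x : String), Dom_f x → Spec_f x (f x)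

-- ===== LEMMAS AND PROOFS =====

-- PySem.Chars.count with a single-character needle is List.count
lemma count_go_single (c : Char) (fuel : Nat) (cs : List Char) (acc : Nat)
    (h : cs.length ≤ fuel) :
    PySem.Chars.count.go [c] fuel cs acc = acc + cs.count c := by
  induction cs generalizing fuel acc with
  | nil => cases fuel <;> simp [PySem.Chars.count.go]
  | cons x t ih =>
      cases fuel with
      | zero => simp at h
      | succ n =>
          simp only [PySem.Chars.count.go, List.isPrefixOf]
          by_cases hx : x = c
          · simp [hx, ih n _ (by simpa using Nat.le_of_succ_le_succ h)]
            omega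
          · simp [hx, ih n _ (by simp at h; omega), Ne.symm hx]

lemma chars_count_single (cs : List Char) (c : Char) :
    PySem.Chars.count cs [c] = cs.count c := by
  simpa using count_go_single c cs.length cs 0 le_rfl

-- A's fold over the characters
lemma foldl_dash (cs : List Char) (a : Int) :
    cs.foldl (fun sum c => if c == '-' then sum - 1 else sum + 1) a
      = a + cs.length - 2 * cs.count '-' := by
  induction cs generalizing a with
  | nil => simp
  | cons x t ih =>
      rw [List.foldl_cons, ih]
      by_cases hx : x = '-'
      · simp [hx]
        ring
      · simp [hx]
        ring

-- ===== VERDICT (by name: the statement is the Claim_ definition above) =====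
theorem f_spec : Claim_equal_f := by
  intro x _
  unfold Spec_f f f_alt
  rw [show PySem.Str.len x = PySem.List.len x.toList from rfl,
      PySem.List.foldl_pyRange_pyGetD x.toList ' '
        (fun sum c => if c == '-' then sum - 1 else sum + 1) 0 (by norm_num)]
  simp only [Int.toNat_zero, List.drop_zero]
  rw [foldl_dash]
  have : PySem.Str.count x "-" = x.toList.count '-' := by
    simp [PySem.Str.count_eq, chars_count_single]
  rw [this]
  simp [PySem.List.len_eq]
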